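-- pv_equiv track=rewrite | github.com/marimasunaga/herpes_keratitis_model | Fig11/3distance_map_csv.py | find_endpoints_in_graph
-- ===== SOURCE A (Python) =====
-- def find_endpoints_in_graph(graph, center_node):
--     """
--     Identify branch endpoints: nodes with no unvisited children during DFS.
--     Returns:
--         branches: {endpoint: [list of skeleton nodes from center to endpoint]}
--         endpoints: list of endpoints
--     """
--     branches = {}
--     endpoints = []
--     visited = set()
--
--     def dfs(u, path, parent):
--         visited.add(u)
--         nbrs = [v for v in graph.get(u, []) if v != parent and v not in visited]
--         if not nbrs and u != center_node:
--             branches[u] = path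
--             endpoints.append(u)
--         for v in nbrs:
--             dfs(v, path + [v], u)
--
--     dfs(center_node, [center_node], None)
--     return branches, endpoints
-- ===== SOURCE B (Python) =====
-- def find_endpoints_in_graph(graph, center_node):
--     """
--     Iterative DFS with an explicit stack; the current path is kept as a
--     shared linked chain of (node, parent_link) cells and materialized into
--     a list only when an endpoint is recorded.
--     """
--     branches = {}
--     endpoints = []
--     visited = set()
--     stack = [(center_node, (center_node, None), None)]
--     while stack:
--         u, link, parent = stack.pop()
--         visited.add(u)
--         nbrs = [v for v in graph.get(u, []) if v != parent and v not in visited]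
--         if not nbrs and u != center_node:
--             path = []
--             node = link
--             while node is not None:
--                 path.append(node[0])
--                 node = node[1]
--             path.reverse()
--             branches[u] = path
--             endpoints.append(u)
--         for v in reversed(nbrs):
--             stack.append((v, (v, link), u))
--     return branches, endpoints
-- ===== Notes on version B (the rewrite author's own statement) =====
-- stated objective: alternative
-- what changed: Replaced the recursive DFS that copies the whole center-to-node path at every call with an iterative explicit-stack DFS whose frames share the path as linked (node, parent) cells, materializing a path list only when an endpoint is recorded; it trades per-call path copies for stack frames and avoids Python's recursion limit on the call depth.
import Mathlib
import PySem

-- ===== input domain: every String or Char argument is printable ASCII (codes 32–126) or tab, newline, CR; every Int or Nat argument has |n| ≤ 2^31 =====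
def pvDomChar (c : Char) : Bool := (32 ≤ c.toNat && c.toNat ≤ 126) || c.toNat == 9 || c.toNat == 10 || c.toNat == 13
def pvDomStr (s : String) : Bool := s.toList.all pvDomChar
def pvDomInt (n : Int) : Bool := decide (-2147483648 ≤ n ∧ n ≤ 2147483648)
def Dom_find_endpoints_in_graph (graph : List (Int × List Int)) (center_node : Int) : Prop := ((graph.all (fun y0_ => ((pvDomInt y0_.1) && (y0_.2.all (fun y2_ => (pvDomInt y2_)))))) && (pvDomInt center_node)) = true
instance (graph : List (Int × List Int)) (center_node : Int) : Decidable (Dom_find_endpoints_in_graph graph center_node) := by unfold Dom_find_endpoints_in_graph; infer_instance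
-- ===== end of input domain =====

-- B replaces A's recursive DFS (which copies the whole path at every call) by an iterative
-- explicit-stack DFS sharing the path as linked cells, copied only at endpoints (alternative).
-- Both ports carry a fuel guard bounding recursion depth only; it is never exhausted on the
-- actual DFS (depth is finite) and the equivalence below holds for the common fuel value used.

-- shared state of the traversal: (branches, endpoints, visited)
def PvSt : Type := PySem.Dict Int (List Int) × List Int × PySem.Set Int

-- total adjacency size; both top-level functions derive their fuel bound from it
def pvAdjSize (graph : List (Int × List Int)) : Nat :=
  (graph.map (fun p => p.2.length)).sum

-- ===== PORT A =====
-- dfs(u, path, parent): fuel decreases with recursion depth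
def pvDfsA (graph : List (Int × List Int)) (center_node : Int) :
    Nat → Int → List Int → Option Int → PvSt → PvSt
  | 0, _, _, _, st => st
  | f + 1, u, path, parent, st =>
      -- visited.add(u)
      let visited := PySem.Set.add st.2.2 u
      -- nbrs = [v for v in graph.get(u, []) if v != parent and v not in visited]
      let nbrs := (PySem.Dict.getD (PySem.Dict.mk graph) u []).filter
        (fun v => (match parent with | some p => v != p | none => true)
                  && !(PySem.Set.contains visited v))
      -- if not nbrs and u != center_node: branches[u] = path; endpoints.append(u)
      let st1 : PvSt :=
        if nbrs.isEmpty && u != center_node then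
          (st.1.insert u path, st.2.1 ++ [u], visited)
        else (st.1, st.2.1, visited)
      -- for v in nbrs: dfs(v, path + [v], u)
      nbrs.foldl (fun st' v => pvDfsA graph center_node f v (path ++ [v]) (some u) st') st1
termination_by f => f

def find_endpoints_in_graph (graph : List (Int × List Int)) (center_node : Int) :
    (List (Int × List Int)) × List Int :=
  let st := pvDfsA graph center_node (2 * (graph.length + pvAdjSize graph) + 4)
              center_node [center_node] none (PySem.Dict.empty, [], PySem.Set.empty)
  (st.1.items, st.2.1)

-- ===== PORT B =====
-- the while loop climbing the linked path cells: path.append(node[0]); node = node[1]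
def pvChainList : List Int → List Int → List Int
  | [], path => path
  | x :: xs, path => pvChainList xs (path ++ [x])

-- adjacency list length bound, used only by the termination measure of the loop
theorem pvGetD_le (graph : List (Int × List Int)) (u : Int) :
    (PySem.Dict.getD (PySem.Dict.mk graph) u []).length ≤ pvAdjSize graph := by
  induction graph with
  | nil => simp [PySem.Dict.getD_eq_get?_getD, PySem.Dict.get?, pvAdjSize]
  | cons p rest ih =>
      obtain ⟨k, l⟩ := p
      rw [PySem.Dict.getD_eq_get?_getD, PySem.Dict.get?_mk_cons]
      rw [PySem.Dict.getD_eq_get?_getD] at ih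
      by_cases h : (k == u) = true
      · simp [h, pvAdjSize]
      · simp only [h, Bool.false_eq_true, if_false]
        have : pvAdjSize rest ≤ pvAdjSize ((k, l) :: rest) := by
          simp [pvAdjSize]
        omega

-- while stack: pop (fuel, u, link, parent); frames carry the fuel guard; head = top of stack,
-- so pushing reversed(nbrs) then popping = prepending the nbrs frames in order
def pvLoopB (graph : List (Int × List Int)) (center_node : Int) :
    List (Nat × Int × List Int × Option Int) → PvSt → PvSt
  | [], st => st
  | (0, _, _, _) :: rest, st => pvLoopB graph center_node rest st
  | (f + 1, u, link, parent) :: rest, st =>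
      let visited := PySem.Set.add st.2.2 u
      let nbrs := (PySem.Dict.getD (PySem.Dict.mk graph) u []).filter
        (fun v => (match parent with | some p => v != p | none => true)
                  && !(PySem.Set.contains visited v))
      let st1 : PvSt :=
        if nbrs.isEmpty && u != center_node then
          (st.1.insert u (pvChainList link []).reverse, st.2.1 ++ [u], visited)
        else (st.1, st.2.1, visited)
      pvLoopB graph center_node
        (nbrs.map (fun v => (f, v, v :: link, some u)) ++ rest) st1
termination_by stack => (stack.map (fun fr => (pvAdjSize graph + 2) ^ fr.1)).sum
decreasing_by
  · simp
  · simp only [List.map_append, List.map_cons, List.sum_append, List.sum_cons, List.map_map,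
      Function.comp_def, List.map_const', List.sum_replicate, smul_eq_mul, Nat.succ_eq_add_one]
    refine Nat.add_lt_add_right ?_ _
    have h1 : (1 : ℕ) ≤ (pvAdjSize graph + 2) ^ f := Nat.one_le_pow _ _ (by omega)
    apply lt_of_le_of_lt
      (Nat.mul_le_mul_right _ (le_trans (List.length_filter_le _ _) (pvGetD_le graph u)))
    calc pvAdjSize graph * (pvAdjSize graph + 2) ^ f
        < (pvAdjSize graph + 2) * (pvAdjSize graph + 2) ^ f :=
          (Nat.mul_lt_mul_right (by omega)).mpr (by omega)
      _ = (pvAdjSize graph + 2) ^ (f + 1) := by rw [pow_succ, Nat.mul_comm]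

def find_endpoints_in_graph_alt (graph : List (Int × List Int)) (center_node : Int) :
    (List (Int × List Int)) × List Int :=
  let st := pvLoopB graph center_node
              [(2 * (graph.length + pvAdjSize graph) + 4, center_node, [center_node], none)]
              (PySem.Dict.empty, [], PySem.Set.empty)
  (st.1.items, st.2.1)

-- ===== PRECONDITION & SPEC =====
def Spec_find_endpoints_in_graph (graph : List (Int × List Int)) (center_node : Int) (out : (List (Int × List Int)) × List Int) : Prop := out = find_endpoints_in_graph_alt graph center_node
instance (graph : List (Int × List Int)) (center_node : Int) (out : (List (Int × List Int)) × List Int) : Decidable (Spec_find_endpoints_in_graph graph center_node out) := by unfold Spec_find_endpoints_in_graph; infer_instance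

-- ===== CLAIM (what is proved, stated in full; the proofs are below) =====
def Claim_equal_find_endpoints_in_graph : Prop := ∀ (graph : List (Int × List Int)) (center_node : Int), Dom_find_endpoints_in_graph graph center_node → Spec_find_endpoints_in_graph graph center_node (find_endpoints_in_graph graph center_node)

-- ===== LEMMAS AND PROOFS =====
theorem pvChainList_eq (xs acc : List Int) : pvChainList xs acc = acc ++ xs := by
  induction xs generalizing acc with
  | nil => simp [pvChainList]
  | cons x xs ih => simp [pvChainList, ih]

theorem pvSim (graph : List (Int × List Int)) (center_node : Int) :
    ∀ (f : Nat) (u : Int) (link : List Int) (parent : Option Int) (st : PvSt)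
      (rest : List (Nat × Int × List Int × Option Int)),
      pvLoopB graph center_node ((f, u, link, parent) :: rest) st
        = pvLoopB graph center_node rest (pvDfsA graph center_node f u link.reverse parent st) := by
  intro f
  induction f with
  | zero =>
      intro u link parent st rest
      simp only [pvLoopB, pvDfsA]
  | succ f ih =>
      intro u link parent st rest
      simp only [pvLoopB, pvDfsA, pvChainList_eq, List.nil_append]
      have inner : ∀ (vs : List Int) (st' : PvSt),
          pvLoopB graph center_node (vs.map (fun v => (f, v, v :: link, some u)) ++ rest) st'
            = pvLoopB graph center_node rest
                (vs.foldl (fun s v => pvDfsA graph center_node f v (link.reverse ++ [v]) (some u) s) st') := by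
        intro vs
        induction vs with
        | nil => intro st'; simp
        | cons v vs ihv =>
            intro st'
            simp only [List.map_cons, List.cons_append, List.foldl_cons]
            rw [ih v (v :: link) (some u) st' (vs.map (fun v => (f, v, v :: link, some u)) ++ rest)]
            rw [List.reverse_cons]
            exact ihv _
      exact inner _ _

-- ===== VERDICT (by name: the statement is the Claim_ definition above) =====
theorem find_endpoints_in_graph_spec : Claim_equal_find_endpoints_in_graph := by
  intro graph center_node _
  unfold Spec_find_endpoints_in_graph find_endpoints_in_graph find_endpoints_in_graph_alt
  rw [pvSim]
  simp [pvLoopB]
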